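-- pv_equiv track=rewrite | github.com/nir-st/Search_Engine | Parsing/posting_handler.py | generate_file_term_dict
-- ===== SOURCE A (Python) =====
-- def generate_file_term_dict(terms_list, inverted_idx):
--     """
--     This function creates a 'file_name' to 'term_list' dictionary for a given term list
--     :param terms_list: A list of terms.
--     :param inverted_idx: The main inverted index dictionary.
--     :return: A dictinoary of key: file_name, value: a list of the terms stored on that file_name.
--     """
--     file_term_dict = {}
--     for term in terms_list:
--         if term in inverted_idx:
--             if inverted_idx[term][2] in file_term_dict:
--                 file_term_dict[inverted_idx[term][2]].append(term)
--             else: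
--                 file_term_dict[inverted_idx[term][2]] = [term]
--     return file_term_dict
-- ===== SOURCE B (Python) =====
-- def generate_file_term_dict(terms_list, inverted_idx):
--     """Group-by decomposition: first collect (file_name, term) pairs for the
--     in-index terms, then build the result per distinct file name."""
--     pairs = [(inverted_idx[t][2], t) for t in terms_list if t in inverted_idx]
--     files = list(dict.fromkeys(f for f, _ in pairs))
--     return {f: [t for g, t in pairs if g == f] for f in files}
-- ===== Notes on version B (the rewrite author's own statement) =====
-- stated objective: alternative
-- what changed: Replaces A's single mutating loop (dict lookup + in-place append/insert per term) by a three-stage group-by: build the (file, term) pair list, dedup the file names in first-occurrence order, then collect each file's terms by a scan over the pairs.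
import Mathlib
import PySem

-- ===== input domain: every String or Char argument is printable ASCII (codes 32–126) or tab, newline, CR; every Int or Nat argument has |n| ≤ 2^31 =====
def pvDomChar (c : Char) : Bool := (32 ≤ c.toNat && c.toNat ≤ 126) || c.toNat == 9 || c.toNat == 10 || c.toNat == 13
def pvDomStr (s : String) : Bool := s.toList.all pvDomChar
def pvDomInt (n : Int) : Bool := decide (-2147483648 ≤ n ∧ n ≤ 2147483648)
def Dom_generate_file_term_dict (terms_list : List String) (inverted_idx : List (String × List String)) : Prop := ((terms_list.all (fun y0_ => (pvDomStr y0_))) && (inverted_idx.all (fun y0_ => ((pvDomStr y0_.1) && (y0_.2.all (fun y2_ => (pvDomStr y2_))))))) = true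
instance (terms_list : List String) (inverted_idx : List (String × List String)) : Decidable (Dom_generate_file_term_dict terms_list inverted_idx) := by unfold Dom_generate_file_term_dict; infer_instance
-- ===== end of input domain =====

-- B replaces A's single mutating dict loop by a group-by decomposition (pair list, ordered dedup of
-- file names, per-file collection scan): objective 'alternative' (same result, different structure, not faster).

-- ===== PORT A =====
-- A: one loop over terms_list mutating a dict (append if the file key exists, insert a fresh singleton otherwise).
def generate_file_term_dict (terms_list : List String) (inverted_idx : List (String × List String)) : List (String × List String) :=
  (terms_list.foldl (fun d term =>
    if (PySem.Dict.mk inverted_idx).contains term then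
      match PySem.Dict.get? (PySem.Dict.mk inverted_idx) term with
      | none => d            -- unreachable: contains = isSome get?
      | some v =>
        match PySem.List.pyGet? v 2 with
        | none => d          -- IndexError in Python; excluded by Pre_
        | some f =>
          if d.contains f then PySem.Dict.modify d f [] (fun ts => ts ++ [term])
          else PySem.Dict.insert d f [term]
    else d) PySem.Dict.empty).items

-- ===== PORT B =====
-- B-side helper: the list of (file_name, term) pairs for the terms present in the index.
def pvPairs (terms_list : List String) (inverted_idx : List (String × List String)) : List (String × String) :=
  terms_list.filterMap (fun t =>
    (PySem.Dict.get? (PySem.Dict.mk inverted_idx) t).bind (fun v =>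
      (PySem.List.pyGet? v 2).map (fun f => (f, t))))

def generate_file_term_dict_alt (terms_list : List String) (inverted_idx : List (String × List String)) : List (String × List String) :=
  let pairs := pvPairs terms_list inverted_idx
  (PySem.List.dedup (pairs.map Prod.fst)).map
    (fun f => (f, (pairs.filter (fun p => p.1 == f)).map Prod.snd))

-- ===== PRECONDITION & SPEC =====
-- Pre_ excludes exactly the inputs where Python A raises IndexError: a term present in the index
-- whose stored list has fewer than 3 entries (inverted_idx[term][2] is out of range).
def Pre_generate_file_term_dict (terms_list : List String) (inverted_idx : List (String × List String)) : Prop :=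
  (terms_list.all (fun t =>
    match PySem.Dict.get? (PySem.Dict.mk inverted_idx) t with
    | none => true
    | some v => decide (2 < v.length))) = true
instance (terms_list : List String) (inverted_idx : List (String × List String)) : Decidable (Pre_generate_file_term_dict terms_list inverted_idx) := by unfold Pre_generate_file_term_dict; infer_instance
def pvWitness_generate_file_term_dict : List String × (List (String × List String)) :=
  (["a", "b", "a", "c"], [("a", ["1", "2", "f1"]), ("b", ["1", "2", "f2", "x"]), ("c", ["0", "0", "f1"])])
def Spec_generate_file_term_dict (terms_list : List String) (inverted_idx : List (String × List String)) (out : List (String × List String)) : Prop := out = generate_file_term_dict_alt terms_list inverted_idx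
instance (terms_list : List String) (inverted_idx : List (String × List String)) (out : List (String × List String)) : Decidable (Spec_generate_file_term_dict terms_list inverted_idx out) := by unfold Spec_generate_file_term_dict; infer_instance

-- ===== CLAIM (what is proved, stated in full; the proofs are below) =====
def Claim_equal_generate_file_term_dict : Prop := ∀ (terms_list : List String) (inverted_idx : List (String × List String)), Dom_generate_file_term_dict terms_list inverted_idx → Pre_generate_file_term_dict terms_list inverted_idx → Spec_generate_file_term_dict terms_list inverted_idx (generate_file_term_dict terms_list inverted_idx)

-- ===== LEMMAS AND PROOFS =====

-- When the key is absent, A's insert of the fresh singleton is the same step as a modify-append.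
theorem pv_insert_eq_modify (d : PySem.Dict String (List String)) (k t : String)
    (h : d.contains k = false) :
    PySem.Dict.insert d k [t] = PySem.Dict.modify d k [] (fun ts => ts ++ [t]) := by
  simp [PySem.Dict.modify, PySem.Dict.getD_of_not_contains _ _ h]

-- A's loop over terms_list is the modify-append loop over the (file, term) pair list.
theorem pv_foldA_eq_foldPairs (terms_list : List String) (inverted_idx : List (String × List String))
    (hpre : Pre_generate_file_term_dict terms_list inverted_idx)
    (d : PySem.Dict String (List String)) :
    terms_list.foldl (fun d term =>
      if (PySem.Dict.mk inverted_idx).contains term then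
        match PySem.Dict.get? (PySem.Dict.mk inverted_idx) term with
        | none => d
        | some v =>
          match PySem.List.pyGet? v 2 with
          | none => d
          | some f =>
            if d.contains f then PySem.Dict.modify d f [] (fun ts => ts ++ [term])
            else PySem.Dict.insert d f [term]
      else d) d
    = (pvPairs terms_list inverted_idx).foldl
        (fun d p => PySem.Dict.modify d p.1 [] (fun ts => ts ++ [p.2])) d := by
  induction terms_list generalizing d with
  | nil => rfl
  | cons t ts ih =>
    unfold Pre_generate_file_term_dict at hpre
    simp only [List.all_cons, Bool.and_eq_true] at hpre
    obtain ⟨ht, hts⟩ := hpre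
    have hts' : Pre_generate_file_term_dict ts inverted_idx := hts
    simp only [List.foldl_cons, pvPairs, List.filterMap_cons]
    rw [PySem.Dict.contains_eq_isSome_get?]
    cases hg : PySem.Dict.get? (PySem.Dict.mk inverted_idx) t with
    | none => simpa [hg] using ih hts' d
    | some v =>
      rw [hg] at ht
      have hv : 2 < v.length := by simpa using ht
      cases hp : PySem.List.pyGet? v 2 with
      | none =>
        exfalso
        rw [PySem.List.pyGet?_eq_none_iff] at hp
        exact hp (by simp [PySem.Raise.InRange]; omega)
      | some f =>
        simp only [hp, Option.isSome_some, Option.bind_some, Option.map_some,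
          List.foldl_cons]
        by_cases hc : PySem.Dict.contains d f
        · rw [if_pos hc]; exact ih hts' _
        · rw [if_neg hc, pv_insert_eq_modify d f t (by simpa using hc)]
          exact ih hts' _

-- The modify-append loop over any pair list produces exactly B's group-by items.
theorem pv_foldPairs_items (ps : List (String × String)) :
    ((ps.foldl (fun d p => PySem.Dict.modify d p.1 [] (fun ts => ts ++ [p.2]))
        PySem.Dict.empty).items)
    = (PySem.List.dedup (ps.map Prod.fst)).map
        (fun f => (f, (ps.filter (fun p => p.1 == f)).map Prod.snd)) := by
  have hnd : ((ps.foldl (fun d p => PySem.Dict.modify d p.1 [] (fun ts => ts ++ [p.2]))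
      PySem.Dict.empty).keys).Nodup := by
    exact PySem.Dict.nodup_keys_foldl_modify_key ps Prod.fst [] (fun d p ts => ts ++ [p.2])
      PySem.Dict.empty (by simp)
  rw [PySem.Dict.items_eq_map_keys _ hnd []]
  have hkeys : (ps.foldl (fun d p => PySem.Dict.modify d p.1 [] (fun ts => ts ++ [p.2]))
      PySem.Dict.empty).keys = PySem.List.dedup (ps.map Prod.fst) := by
    rw [PySem.Dict.keys_foldl_modify_key]
    simp [PySem.Set.update_nil_left]
  rw [hkeys]
  apply List.map_congr_left
  intro f _
  congr 1
  rw [PySem.Dict.getD_foldl_modify_append]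
  simp

-- ===== VERDICT (by name: the statement is the Claim_ definition above) =====
theorem generate_file_term_dict_spec : Claim_equal_generate_file_term_dict := by
  intro terms_list inverted_idx _ hpre
  unfold Spec_generate_file_term_dict generate_file_term_dict generate_file_term_dict_alt
  rw [pv_foldA_eq_foldPairs terms_list inverted_idx hpre, pv_foldPairs_items]
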